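-- pv_equiv track=rewrite | github.com/bkpawar/VedicCrypto | src/main.py | jata_patha
-- ===== SOURCE A (Python) =====
-- def generate_pattern(num_words):
--     num_words = len(num_words.split())
--     pattern = []
--     current_line = [1, 2, 2, 1, 1, 2]
--     while True:
--         pattern.extend(current_line)
--         if max(current_line) > num_words:
--             break
--         current_line = [x + 1 for x in current_line]
--
--     return pattern
--
-- def jata_patha(sentence):
--     words = sentence.split()
--     num_words = len(words)
--     pattern = generate_pattern(sentence)
--     result = []
--     for index in pattern:
--         result.append(words[(index - 1) % num_words])
--     return ' '.join(result)
-- ===== SOURCE B (Python) =====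
-- def jata_patha(sentence):
--     # Jata patha pairs each word with its cyclic successor and recites the pair
--     # as a-b b-a a-b: zip the word list with its rotation, no index arithmetic.
--     words = sentence.split()
--     rotated = words[1:] + words[:1]
--     out = []
--     for a, b in zip(words, rotated):
--         out += [a, b, b, a, a, b]
--     return ' '.join(out)
-- ===== Notes on version B (the rewrite author's own statement) =====
-- stated objective: alternative
-- what changed: Replaces the index-pattern machinery (generate_pattern's grow-until-max-exceeds loop plus modular indexing words[(i-1)%n]) with a pairwise formulation: zip the word list with its one-step rotation words[1:]+words[:1] and emit a b b a a b for each pair, with no indices, no modulo and no line count.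
import Mathlib
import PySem

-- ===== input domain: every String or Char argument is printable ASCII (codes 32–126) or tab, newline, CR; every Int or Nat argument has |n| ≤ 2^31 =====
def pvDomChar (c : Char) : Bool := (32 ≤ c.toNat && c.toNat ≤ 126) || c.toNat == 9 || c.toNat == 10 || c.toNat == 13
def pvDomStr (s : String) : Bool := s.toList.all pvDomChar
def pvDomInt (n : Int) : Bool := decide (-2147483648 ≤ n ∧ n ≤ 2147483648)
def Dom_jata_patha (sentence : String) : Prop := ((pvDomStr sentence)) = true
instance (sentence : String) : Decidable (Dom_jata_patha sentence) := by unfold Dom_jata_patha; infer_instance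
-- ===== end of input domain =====

-- B replaces A's index-pattern generation + modular indexing with a pairwise
-- zip of the word list against its one-step rotation (objective: alternative).

-- ===== PORT A =====
-- the 'while True' loop of generate_pattern; fuel only makes it total (it is always
-- sufficient at the call site below, where the loop runs max(1, num_words) times)
def jp_loop (num_words : Int) (current_line : List Int) (pattern : List Int) (fuel : Nat) : List Int :=
  match fuel with
  | 0 => pattern
  | Nat.succ f =>
    let pattern := pattern ++ current_line
    -- current_line is nonempty throughout, so Python's max never raises; getD 0 is unreachable
    if num_words < (PySem.List.max? current_line (fun x => x)).getD 0 then pattern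
    else jp_loop num_words (current_line.map (fun x => x + 1)) pattern f

def generate_pattern (num_words_s : String) : List Int :=
  let num_words : Int := (PySem.Str.split₀ num_words_s).length
  jp_loop num_words [1, 2, 2, 1, 1, 2] [] ((PySem.Str.split₀ num_words_s).length + 1)

def jata_patha (sentence : String) : String :=
  let words := PySem.Str.split₀ sentence
  let num_words : Int := words.length
  let pattern := generate_pattern sentence
  -- words[(index-1) % num_words]: under Pre_ the index is in range, getD "" is unreachable
  let result := pattern.foldl
    (fun acc index => acc ++ [PySem.List.pyGetD words (PySem.Int.mod (index - 1) num_words) ""]) []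
  PySem.Str.join " " result

-- ===== PORT B =====
def jata_patha_alt (sentence : String) : String :=
  let words := PySem.Str.split₀ sentence
  let rotated := PySem.List.slice words (some 1) none ++ PySem.List.slice words none (some 1)
  let out := (words.zip rotated).foldl
    (fun acc p => acc ++ [p.1, p.2, p.2, p.1, p.1, p.2]) []
  PySem.Str.join " " out

-- ===== PRECONDITION & SPEC =====
-- Pre_ excludes sentences with no words (empty / all-whitespace), on which A raises
-- ZeroDivisionError at the modulo by the zero word count.
def Pre_jata_patha (sentence : String) : Prop := PySem.Str.split₀ sentence ≠ []
instance (sentence : String) : Decidable (Pre_jata_patha sentence) := by unfold Pre_jata_patha; infer_instance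
def pvWitness_jata_patha : String := "om mani padme hum"

def Spec_jata_patha (sentence : String) (out : String) : Prop := out = jata_patha_alt sentence
instance (sentence : String) (out : String) : Decidable (Spec_jata_patha sentence out) := by unfold Spec_jata_patha; infer_instance

-- ===== CLAIM (what is proved, stated in full; the proofs are below) =====
def Claim_equal_jata_patha : Prop := ∀ (sentence : String), Dom_jata_patha sentence → Pre_jata_patha sentence → Spec_jata_patha sentence (jata_patha sentence)

-- ===== LEMMAS AND PROOFS =====

-- folding 'acc ++ g i' over a list appends the flattened images
theorem jp_foldl_append_flat {α β : Type} (g : β → List α) :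
    ∀ (l : List β) (init : List α),
      l.foldl (fun acc i => acc ++ g i) init = init ++ l.flatMap g := by
  intro l
  induction l with
  | nil => simp
  | cons x t ih => intro init; simp [List.foldl, ih]

-- flatMap is associative
theorem jp_flatMap_flatMap {α β γ : Type} (f : α → List β) (g : β → List γ) :
    ∀ (l : List α), (l.flatMap f).flatMap g = l.flatMap (fun x => (f x).flatMap g) := by
  intro l
  induction l with
  | nil => simp
  | cons x t ih => simp [ih]

-- the max of the current line [i, i+1, i+1, i, i, i+1] is i+1
theorem jp_line_max (i : Int) :
    (PySem.List.max? [i, i + 1, i + 1, i, i, i + 1] (fun x => x)).getD 0 = i + 1 := by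
  simp [PySem.List.max?_id_cons, List.foldl]

-- running the loop from line i (1 ≤ i ≤ n) with enough fuel yields the lines i..n
theorem jp_loop_run (n : Int) :
    ∀ (r : Nat) (i : Int) (pattern : List Int) (fuel : Nat),
      i + r = n → 1 ≤ i → r < fuel →
      jp_loop n [i, i + 1, i + 1, i, i, i + 1] pattern fuel
        = pattern ++ (PySem.List.pyRange i (n + 1) 1).flatMap
            (fun j => [j, j + 1, j + 1, j, j, j + 1]) := by
  intro r
  induction r with
  | zero =>
    intro i pattern fuel hin hi hf
    match fuel, hf with
    | Nat.succ f, _ =>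
      have hn : i = n := by omega
      subst hn
      rw [jp_loop, jp_line_max, if_pos (by omega)]
      rw [PySem.List.pyRange_one_cons (by omega)]
      have hnil : PySem.List.pyRange (i + 1) (i + 1) 1 = [] := by
        simp [PySem.List.pyRange]
      rw [hnil]
      simp
  | succ r ih =>
    intro i pattern fuel hin hi hf
    match fuel, hf with
    | Nat.succ f, _ =>
      rw [jp_loop, jp_line_max, if_neg (by omega)]
      have hmap : [i, i + 1, i + 1, i, i, i + 1].map (fun x => x + 1)
          = [i + 1, i + 1 + 1, i + 1 + 1, i + 1, i + 1, i + 1 + 1] := by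
        simp
      rw [PySem.List.pyRange_one_cons (show i < n + 1 by omega)]
      rw [hmap, ih (i + 1) (pattern ++ [i, i + 1, i + 1, i, i, i + 1]) f
           (by push_cast at hin ⊢; omega) (by omega) (by omega)]
      simp

-- under Pre_, the generated pattern is the concatenation of the lines 1..n
theorem jp_generate_pattern_eq (s : String) (h : PySem.Str.split₀ s ≠ []) :
    generate_pattern s
      = (PySem.List.pyRange 1 (((PySem.Str.split₀ s).length : Int) + 1) 1).flatMap
          (fun j => [j, j + 1, j + 1, j, j, j + 1]) := by
  have hlen : 1 ≤ (PySem.Str.split₀ s).length := by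
    cases hw : PySem.Str.split₀ s with
    | nil => exact absurd hw h
    | cons a t => simp
  unfold generate_pattern
  dsimp only
  have h2 : ([1, 2, 2, 1, 1, 2] : List Int) = [1, 1 + 1, 1 + 1, 1, 1, 1 + 1] := by norm_num
  rw [h2, jp_loop_run ((PySem.Str.split₀ s).length : Int) ((PySem.Str.split₀ s).length - 1) 1 []
      ((PySem.Str.split₀ s).length + 1) (by omega) (by omega) (by omega)]
  simp

-- the pair list A's modular indexing walks through IS the zip with the rotation
theorem jp_pairs_eq (words : List String) (h : words ≠ []) :
    (PySem.List.pyRange 1 ((words.length : Int) + 1) 1).map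
      (fun j => (PySem.List.pyGetD words (PySem.Int.mod (j - 1) (words.length : Int)) "",
                 PySem.List.pyGetD words (PySem.Int.mod (j + 1 - 1) (words.length : Int)) ""))
      = words.zip (words.drop 1 ++ words.take 1) := by
  have hn : 1 ≤ words.length := List.length_pos_iff.mpr h
  apply List.ext_getElem
  · simp [PySem.List.length_pyRange_one]
    omega
  · intro k hk1 hk2
    have hklt : k < words.length := by
      simp [PySem.List.length_pyRange_one] at hk1
      omega
    rw [List.getElem_map, PySem.List.getElem_pyRange_one]
    have e1 : (1 : Int) + (k : Int) - 1 = ((k : Nat) : Int) := by ring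
    have e2 : (1 : Int) + (k : Int) + 1 - 1 = (((k + 1 : Nat)) : Int) := by push_cast; ring
    rw [e1, e2, PySem.Int.mod_natCast, PySem.Int.mod_natCast,
        PySem.List.pyGetD_natCast, PySem.List.pyGetD_natCast]
    have hm1 : k % words.length = k := Nat.mod_eq_of_lt hklt
    rw [List.getElem_zip]
    have hg1 : words.getD k "" = words[k] := List.getD_eq_getElem words "" hklt
    by_cases hlast : k + 1 < words.length
    · have hm2 : (k + 1) % words.length = k + 1 := Nat.mod_eq_of_lt hlast
      have hg2 : words.getD (k + 1) "" = words[k + 1] := List.getD_eq_getElem words "" hlast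
      rw [hm1, hm2, hg1, hg2,
          List.getElem_append_left (by simp; omega : k < (words.drop 1).length)]
      simp
    · have hke : k + 1 = words.length := by omega
      have hm2 : (k + 1) % words.length = 0 := by rw [hke]; exact Nat.mod_self _
      have h0 : 0 < words.length := by omega
      have hg2 : words.getD 0 "" = words[0] := List.getD_eq_getElem words "" h0
      rw [hm1, hm2, hg1, hg2,
          List.getElem_append_right (by simp; omega : (words.drop 1).length ≤ k),
          List.getElem_take]
      congr 2
      simp
      omega

-- ===== VERDICT (by name: the statement is the Claim_ definition above) =====
theorem jata_patha_spec : Claim_equal_jata_patha := by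
  intro s _ hpre
  unfold Spec_jata_patha jata_patha jata_patha_alt
  dsimp only
  rw [jp_generate_pattern_eq s hpre]
  rw [jp_foldl_append_flat, jp_foldl_append_flat, jp_flatMap_flatMap]
  rw [PySem.List.slice_from_one, PySem.List.slice_to (PySem.Str.split₀ s) (by norm_num : (0:Int) ≤ 1)]
  rw [← List.drop_one, Int.toNat_one]
  rw [← jp_pairs_eq (PySem.Str.split₀ s) hpre]
  rw [List.flatMap_map]
  rfl
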